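-- pv_equiv track=rewrite | github.com/abhilashnagamalla/intelligent_data_hub | backend/app/services/dataset_catalog.py | normalize_sector_key
-- ===== SOURCE A (Python) =====
-- SECTOR_LABELS = {
--     "agriculture": "Agriculture",
--     "census": "Census and Surveys",
--     "education": "Education",
--     "finance": "Finance",
--     "health": "Health and Family Welfare",
--     "transport": "Transport",
-- }
--
-- SECTOR_ALIASES = {
--     "agriculture": {"agriculture", "agri"},
--     "census": {"census", "census and surveys", "survey", "surveys"},
--     "education": {"education", "school", "schools"},
--     "finance": {"finance", "financial"},
--     "health": {"health", "healthcare", "family welfare", "health and family welfare"},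
--     "transport": {"transport", "transportation"},
-- }
--
-- def normalize_sector_key(value: str | None) -> str:
--     if not value:
--         return ""
--     normalized = str(value).strip().lower()
--     for key, label in SECTOR_LABELS.items():
--         aliases = SECTOR_ALIASES.get(key, set())
--         if normalized == key or normalized == label.lower() or normalized in aliases:
--             return key
--     return normalized
-- ===== SOURCE B (Python) =====
-- SECTOR_LABELS = {
--     "agriculture": "Agriculture",
--     "census": "Census and Surveys",
--     "education": "Education",
--     "finance": "Finance",
--     "health": "Health and Family Welfare",
--     "transport": "Transport",
-- }
--
-- SECTOR_ALIASES = {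
--     "agriculture": {"agriculture", "agri"},
--     "census": {"census", "census and surveys", "survey", "surveys"},
--     "education": {"education", "school", "schools"},
--     "finance": {"finance", "financial"},
--     "health": {"health", "healthcare", "family welfare", "health and family welfare"},
--     "transport": {"transport", "transportation"},
-- }
--
-- # One reverse-lookup table built once: canonical key -> key, lowercased label -> key, alias -> key.
-- _REVERSE = {}
-- for _key, _label in SECTOR_LABELS.items():
--     _REVERSE[_key] = _key
--     _REVERSE[_label.lower()] = _key
-- for _key, _aliases in SECTOR_ALIASES.items():
--     for _alias in _aliases:
--         _REVERSE[_alias] = _key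
--
--
-- def normalize_sector_key(value):
--     if not value:
--         return ""
--     normalized = str(value).strip().lower()
--     return _REVERSE.get(normalized, normalized)
-- ===== Notes on version B (the rewrite author's own statement) =====
-- stated objective: idiomatic
-- what changed: Replaces the per-call scan over SECTOR_LABELS with its three-way comparison (key / lowercased label / alias-set membership) by a single reverse-lookup dict built once at module level, so the function body is one dict.get.
import Mathlib
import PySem

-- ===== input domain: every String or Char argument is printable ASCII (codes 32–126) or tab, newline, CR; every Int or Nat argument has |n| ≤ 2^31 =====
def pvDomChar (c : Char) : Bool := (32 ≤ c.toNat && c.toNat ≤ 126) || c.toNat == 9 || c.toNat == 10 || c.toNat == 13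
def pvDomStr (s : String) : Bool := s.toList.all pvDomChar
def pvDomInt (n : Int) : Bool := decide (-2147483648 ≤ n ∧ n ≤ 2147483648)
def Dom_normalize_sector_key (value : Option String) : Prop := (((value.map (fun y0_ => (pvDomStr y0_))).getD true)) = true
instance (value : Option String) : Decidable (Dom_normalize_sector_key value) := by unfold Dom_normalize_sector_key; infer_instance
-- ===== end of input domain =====

-- B replaces the per-call scan over SECTOR_LABELS (key / lowercased label / alias-set
-- membership) with a single reverse-lookup dict built once at module level (idiomatic).

-- ===== PORT A =====
def pvSectorLabels : PySem.Dict String String := PySem.Dict.mk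
  [("agriculture", "Agriculture"), ("census", "Census and Surveys"),
   ("education", "Education"), ("finance", "Finance"),
   ("health", "Health and Family Welfare"), ("transport", "Transport")]

def pvSectorAliases : PySem.Dict String (PySem.Set String) := PySem.Dict.mk
  [("agriculture", ["agriculture", "agri"]),
   ("census", ["census", "census and surveys", "survey", "surveys"]),
   ("education", ["education", "school", "schools"]),
   ("finance", ["finance", "financial"]),
   ("health", ["health", "healthcare", "family welfare", "health and family welfare"]),
   ("transport", ["transport", "transportation"])]

-- the 'for key, label in SECTOR_LABELS.items(): … return key / fall through'
def nskLoop (normalized : String) : List (String × String) → String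
  | [] => normalized
  | (key, label) :: rest =>
      let aliases := PySem.Dict.getD pvSectorAliases key []
      if normalized = key ∨ normalized = PySem.Str.lower label ∨ normalized ∈ aliases then key
      else nskLoop normalized rest

def normalize_sector_key (value : Option String) : String :=
  match value with
  | none => ""
  | some v =>
      if v = "" then ""
      else nskLoop (PySem.Str.lower (PySem.Str.strip v)) pvSectorLabels.items

-- ===== PORT B =====
-- module-level construction of the reverse map, as in Source B
def pvReverse : PySem.Dict String String :=
  let d := pvSectorLabels.items.foldl
    (fun d kl => (d.insert kl.1 kl.1).insert (PySem.Str.lower kl.2) kl.1) PySem.Dict.empty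
  pvSectorAliases.items.foldl
    (fun d ka => ka.2.foldl (fun d a => d.insert a ka.1) d) d

def normalize_sector_key_alt (value : Option String) : String :=
  match value with
  | none => ""
  | some v =>
      if v = "" then ""
      else
        let normalized := PySem.Str.lower (PySem.Str.strip v)
        PySem.Dict.getD pvReverse normalized normalized

-- ===== PRECONDITION & SPEC =====
def Spec_normalize_sector_key (value : Option String) (out : String) : Prop := out = normalize_sector_key_alt value
instance (value : Option String) (out : String) : Decidable (Spec_normalize_sector_key value out) := by unfold Spec_normalize_sector_key; infer_instance

-- ===== CLAIM (what is proved, stated in full; the proofs are below) =====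
def Claim_equal_normalize_sector_key : Prop := ∀ (value : Option String), Dom_normalize_sector_key value → Spec_normalize_sector_key value (normalize_sector_key value)

-- ===== LEMMAS AND PROOFS =====

-- the core fact: for any normalized string, A's scan equals B's reverse lookup
theorem nskLoop_eq_reverse (s : String) :
    nskLoop s pvSectorLabels.items = PySem.Dict.getD pvReverse s s := by
  have hrev : pvReverse = PySem.Dict.mk
      [("agriculture", "agriculture"), ("census", "census"),
       ("census and surveys", "census"), ("education", "education"),
       ("finance", "finance"), ("health", "health"),
       ("health and family welfare", "health"), ("transport", "transport"),
       ("agri", "agriculture"), ("survey", "census"), ("surveys", "census"),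
       ("school", "education"), ("schools", "education"),
       ("financial", "finance"), ("healthcare", "health"),
       ("family welfare", "health"), ("transportation", "transport")] := by decide
  rw [hrev]
  by_cases h0 : s = "agriculture"
  · subst h0; decide
  by_cases h1 : s = "census"
  · subst h1; decide
  by_cases h2 : s = "census and surveys"
  · subst h2; decide
  by_cases h3 : s = "education"
  · subst h3; decide
  by_cases h4 : s = "finance"
  · subst h4; decide
  by_cases h5 : s = "health"
  · subst h5; decide
  by_cases h6 : s = "health and family welfare"
  · subst h6; decide
  by_cases h7 : s = "transport"
  · subst h7; decide
  by_cases h8 : s = "agri"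
  · subst h8; decide
  by_cases h9 : s = "survey"
  · subst h9; decide
  by_cases h10 : s = "surveys"
  · subst h10; decide
  by_cases h11 : s = "school"
  · subst h11; decide
  by_cases h12 : s = "schools"
  · subst h12; decide
  by_cases h13 : s = "financial"
  · subst h13; decide
  by_cases h14 : s = "healthcare"
  · subst h14; decide
  by_cases h15 : s = "family welfare"
  · subst h15; decide
  by_cases h16 : s = "transportation"
  · subst h16; decide
  -- s matches no table entry: both sides fall through to s
  have l1 : PySem.Str.lower "Agriculture" = "agriculture" := by decide
  have l2 : PySem.Str.lower "Census and Surveys" = "census and surveys" := by decide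
  have l3 : PySem.Str.lower "Education" = "education" := by decide
  have l4 : PySem.Str.lower "Finance" = "finance" := by decide
  have l5 : PySem.Str.lower "Health and Family Welfare" = "health and family welfare" := by decide
  have l6 : PySem.Str.lower "Transport" = "transport" := by decide
  have a1 : PySem.Dict.getD pvSectorAliases "agriculture" [] = ["agriculture", "agri"] := by decide
  have a2 : PySem.Dict.getD pvSectorAliases "census" [] = ["census", "census and surveys", "survey", "surveys"] := by decide
  have a3 : PySem.Dict.getD pvSectorAliases "education" [] = ["education", "school", "schools"] := by decide
  have a4 : PySem.Dict.getD pvSectorAliases "finance" [] = ["finance", "financial"] := by decide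
  have a5 : PySem.Dict.getD pvSectorAliases "health" [] = ["health", "healthcare", "family welfare", "health and family welfare"] := by decide
  have a6 : PySem.Dict.getD pvSectorAliases "transport" [] = ["transport", "transportation"] := by decide
  simp only [nskLoop, pvSectorLabels, a1, a2, a3, a4, a5, a6, l1, l2, l3, l4, l5, l6]
  simp [PySem.Dict.getD, PySem.Dict.get?, h0, h1, h2, h3, h4, h5, h6, h7, h8, h9,
    h10, h11, h12, h13, h14, h15, h16, Ne.symm h0, Ne.symm h1, Ne.symm h2, Ne.symm h3,
    Ne.symm h4, Ne.symm h5, Ne.symm h6, Ne.symm h7, Ne.symm h8, Ne.symm h9, Ne.symm h10,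
    Ne.symm h11, Ne.symm h12, Ne.symm h13, Ne.symm h14, Ne.symm h15, Ne.symm h16]

theorem normalize_sector_key_spec : Claim_equal_normalize_sector_key := by
  intro value _
  unfold Spec_normalize_sector_key normalize_sector_key normalize_sector_key_alt
  match value with
  | none => rfl
  | some v =>
      by_cases h : v = "" <;> simp [h, nskLoop_eq_reverse]
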